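-- pv_equiv track=rewrite | github.com/yetmgetaewunetu/competitive_programming | 13-Feb-2025/Get Equal Substrings Within Budget 263443.py | equalSubstring
-- ===== SOURCE A (Python) =====
-- def equalSubstring(s: str, t: str, maxCost: int) -> int:
--     window = l = res =0
--
--     for r in range(len(s)):
--         window += abs(ord(s[r]) - ord(t[r]))
--         while window > maxCost:
--             window -= abs(ord(s[l])-ord(t[l]))
--             l += 1
--         res = max(res, r-l+1)
--     return res
-- ===== SOURCE B (Python) =====
-- def equalSubstring(s: str, t: str, maxCost: int) -> int:
--     # prefix-sum table + per-index binary search (alternative to the amortized sliding window)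
--     P = [0]
--     for a, b in zip(s, t):
--         P.append(P[-1] + abs(ord(a) - ord(b)))
--     res = 0
--     for r in range(len(s)):
--         target = P[r + 1] - maxCost
--         lo, hi = 0, r + 1
--         while lo < hi:
--             mid = (lo + hi) // 2
--             if P[mid] < target:
--                 lo = mid + 1
--             else:
--                 hi = mid
--         res = max(res, r + 1 - lo)
--     return res
-- ===== Notes on version B (the rewrite author's own statement) =====
-- stated objective: alternative
-- what changed: Replaces A's amortized two-pointer sliding window with a prefix-sum table of per-index costs and, for each right endpoint, a hand-written binary search for the leftmost feasible left endpoint.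
import Mathlib
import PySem

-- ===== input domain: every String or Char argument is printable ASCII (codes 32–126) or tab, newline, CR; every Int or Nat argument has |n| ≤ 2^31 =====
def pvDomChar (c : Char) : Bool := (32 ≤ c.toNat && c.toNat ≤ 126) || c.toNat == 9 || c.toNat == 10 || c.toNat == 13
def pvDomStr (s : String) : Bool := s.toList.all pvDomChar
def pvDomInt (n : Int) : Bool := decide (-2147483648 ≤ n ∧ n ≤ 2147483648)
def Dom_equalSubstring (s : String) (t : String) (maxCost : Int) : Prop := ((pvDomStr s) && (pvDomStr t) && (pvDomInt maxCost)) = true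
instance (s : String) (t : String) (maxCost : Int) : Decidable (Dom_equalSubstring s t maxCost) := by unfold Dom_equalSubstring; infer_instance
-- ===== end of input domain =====

-- B replaces A's amortized sliding window by a prefix-sum table with a per-index binary
-- search (an alternative decomposition of similar cost); equivalence is about return
-- values (neither program mutates its arguments).

-- ===== PORT A =====
-- the inner `while window > maxCost` loop; fuel only makes the recursion total (inside
-- Pre_ it is never exhausted; Python raises IndexError exactly where Pre_ excludes)
def pvShrink (cost : Nat → Int) (maxCost : Int) : Nat → Int → Nat → Int × Nat
  | 0, w, l => (w, l)
  | fuel + 1, w, l =>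
    if maxCost < w then pvShrink cost maxCost fuel (w - cost l) (l + 1) else (w, l)

def pvStepA (cost : Nat → Int) (maxCost : Int) (fuel : Nat) (st : Int × Nat × Int) (r : Nat) :
    Int × Nat × Int :=
  let w := st.1 + cost r
  let p := pvShrink cost maxCost fuel w st.2.1
  (p.1, p.2, max st.2.2 ((r : Int) - (p.2 : Int) + 1))

def equalSubstring (s : String) (t : String) (maxCost : Int) : Int :=
  let sc := s.toList.map (fun ch => (ch.toNat : Int))
  let tc := t.toList.map (fun ch => (ch.toNat : Int))
  let n := sc.length
  let cost := fun i => |sc.getD i 0 - tc.getD i 0|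
  ((List.range n).foldl (pvStepA cost maxCost (n + 1)) (0, 0, 0)).2.2

-- ===== PORT B =====
-- the hand-written `while lo < hi` binary search of Source B, step for step; fuel only makes
-- the loop total (hi - lo shrinks every iteration, so fuel = hi - lo + 1 is never exhausted)
def pvBisect (P : List Int) (target : Int) : Nat → Nat → Nat → Nat
  | 0, lo, _ => lo
  | fuel + 1, lo, hi =>
    if lo < hi then
      let mid := (lo + hi) / 2
      if P.getD mid 0 < target then pvBisect P target fuel (mid + 1) hi
      else pvBisect P target fuel lo mid
    else lo

def pvStepB (P : List Int) (maxCost : Int) (res : Int) (r : Nat) : Int :=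
  let target := P.getD (r + 1) 0 - maxCost
  let lo := pvBisect P target (r + 2) 0 (r + 1)
  max res ((r : Int) + 1 - (lo : Int))

def equalSubstring_alt (s : String) (t : String) (maxCost : Int) : Int :=
  let P := (s.toList.zip t.toList).foldl
    (fun acc p => acc ++ [acc.getLastD 0 + |((p.1.toNat : Int)) - (p.2.toNat : Int)|]) [0]
  (List.range s.toList.length).foldl (pvStepB P maxCost) 0

-- ===== PRECONDITION & SPEC =====
-- Pre_ is exactly where A returns: A raises IndexError when t is shorter than s, and
-- (draining the window off the end of s) whenever s is nonempty and maxCost < 0.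
def Pre_equalSubstring (s : String) (t : String) (maxCost : Int) : Prop :=
  s.toList.length ≤ t.toList.length ∧ (s.toList = [] ∨ 0 ≤ maxCost)
instance (s : String) (t : String) (maxCost : Int) : Decidable (Pre_equalSubstring s t maxCost) := by
  unfold Pre_equalSubstring; infer_instance
def pvWitness_equalSubstring : String × String × Int := ("abcd", "acde", 3)

def Spec_equalSubstring (s : String) (t : String) (maxCost : Int) (out : Int) : Prop := out = equalSubstring_alt s t maxCost
instance (s : String) (t : String) (maxCost : Int) (out : Int) : Decidable (Spec_equalSubstring s t maxCost out) := by unfold Spec_equalSubstring; infer_instance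

-- ===== CLAIM (what is proved, stated in full; the proofs are below) =====
def Claim_equal_equalSubstring : Prop := ∀ (s : String) (t : String) (maxCost : Int), Dom_equalSubstring s t maxCost → Pre_equalSubstring s t maxCost → Spec_equalSubstring s t maxCost (equalSubstring s t maxCost)

-- ===== LEMMAS AND PROOFS =====

theorem pvShrink_succ (cost : Nat → Int) (K : Int) (fuel : Nat) (w : Int) (l : Nat) :
    pvShrink cost K (fuel + 1) w l =
      if K < w then pvShrink cost K fuel (w - cost l) (l + 1) else (w, l) := rfl

theorem pvBisect_succ (P : List Int) (target : Int) (fuel lo hi : Nat) :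
    pvBisect P target (fuel + 1) lo hi =
      if lo < hi then
        if P.getD ((lo + hi) / 2) 0 < target then pvBisect P target fuel ((lo + hi) / 2 + 1) hi
        else pvBisect P target fuel lo ((lo + hi) / 2)
      else lo := rfl

-- prefix sums of the cost list
def pvPf (c : List Int) (i : Nat) : Int := (c.take i).sum

theorem pvPf_succ (c : List Int) (k : Nat) : pvPf c (k + 1) = pvPf c k + c.getD k 0 := by
  unfold pvPf
  rcases lt_or_ge k c.length with h | h
  · rw [List.take_add_one, List.sum_append, List.getD_eq_getElem c 0 h]
    simp [List.getElem?_eq_getElem h]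
  · rw [List.take_of_length_le h, List.take_of_length_le (by omega), List.getD_eq_default _ _ h]
    simp

theorem pvPf_mono (c : List Int) (hc : ∀ x ∈ c, 0 ≤ x) {i j : Nat} (h : i ≤ j) :
    pvPf c i ≤ pvPf c j := by
  induction j with
  | zero => simp [Nat.le_zero.mp h]
  | succ j ih =>
    rcases Nat.lt_or_ge i (j + 1) with hij | hij
    · have h1 : pvPf c i ≤ pvPf c j := ih (by omega)
      have h2 : (0:Int) ≤ c.getD j 0 := by
        rcases lt_or_ge j c.length with hj | hj
        · rw [List.getD_eq_getElem c 0 hj]; exact hc _ (List.getElem_mem hj)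
        · rw [List.getD_eq_default _ _ hj]
      rw [pvPf_succ]; omega
    · have : i = j + 1 := by omega
      simp [this]

-- least l with Pf r1 - Pf l ≤ K (it exists: l = r1 works since 0 ≤ K)
def pvL (c : List Int) (K : Int) (hK : 0 ≤ K) (r1 : Nat) : Nat :=
  @Nat.find (fun l => pvPf c r1 - pvPf c l ≤ K) (fun _ => inferInstance)
    ⟨r1, by simpa using hK⟩

theorem pvL_spec (c : List Int) (K : Int) (hK : 0 ≤ K) (r1 : Nat) :
    pvPf c r1 - pvPf c (pvL c K hK r1) ≤ K := by
  have := Nat.find_spec (p := fun l => pvPf c r1 - pvPf c l ≤ K) ⟨r1, by simpa using hK⟩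
  simpa [pvL] using this

theorem pvL_not (c : List Int) (K : Int) (hK : 0 ≤ K) (r1 : Nat) {m : Nat}
    (hm : m < pvL c K hK r1) : ¬ (pvPf c r1 - pvPf c m ≤ K) := by
  have := Nat.find_min (p := fun l => pvPf c r1 - pvPf c l ≤ K) ⟨r1, by simpa using hK⟩
    (m := m) (by simpa [pvL] using hm)
  simpa using this

theorem pvL_min (c : List Int) (K : Int) (hK : 0 ≤ K) (r1 : Nat) {m : Nat}
    (hm : pvPf c r1 - pvPf c m ≤ K) : pvL c K hK r1 ≤ m := by
  have := Nat.find_min' (p := fun l => pvPf c r1 - pvPf c l ≤ K) ⟨r1, by simpa using hK⟩ hm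
  simpa [pvL] using this

theorem pvL_le (c : List Int) (K : Int) (hK : 0 ≤ K) (r1 : Nat) : pvL c K hK r1 ≤ r1 :=
  pvL_min c K hK r1 (by simpa using hK)

theorem pvL_mono (c : List Int) (hc : ∀ x ∈ c, 0 ≤ x) (K : Int) (hK : 0 ≤ K) (r1 : Nat) :
    pvL c K hK r1 ≤ pvL c K hK (r1 + 1) := by
  apply pvL_min
  have h1 := pvL_spec c K hK (r1 + 1)
  have h2 : pvPf c r1 ≤ pvPf c (r1 + 1) := pvPf_mono c hc (by omega)
  omega

-- the per-index answer both programs compute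
def pvRes (c : List Int) (K : Int) (hK : 0 ≤ K) (k : Nat) : Int :=
  (List.range k).foldl
    (fun res (r : Nat) => max res ((r : Int) + 1 - ((pvL c K hK (r + 1) : Nat) : Int))) 0

theorem pvShrink_eq (c : List Int) (K : Int) (hK : 0 ≤ K) (cost : Nat → Int)
    (hcost : ∀ i < c.length, cost i = c.getD i 0) (r1 : Nat) (hr1 : r1 ≤ c.length) :
    ∀ fuel l, l ≤ pvL c K hK r1 → pvL c K hK r1 - l ≤ fuel →
      pvShrink cost K fuel (pvPf c r1 - pvPf c l) l =
        (pvPf c r1 - pvPf c (pvL c K hK r1), pvL c K hK r1) := by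
  intro fuel
  induction fuel with
  | zero =>
    intro l hl hf
    have : l = pvL c K hK r1 := by omega
    subst this; rfl
  | succ fuel ih =>
    intro l hl hf
    rcases Nat.eq_or_lt_of_le hl with he | hlt
    · have hsp := pvL_spec c K hK r1
      rw [he, pvShrink_succ, if_neg (by omega)]
    · have hgt := pvL_not c K hK r1 hlt
      have hlen : l < c.length := by have := pvL_le c K hK r1; omega
      rw [pvShrink_succ, if_pos (by omega)]
      have harg : pvPf c r1 - pvPf c l - cost l = pvPf c r1 - pvPf c (l + 1) := by
        rw [hcost l hlen, pvPf_succ]; ring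
      rw [harg]
      exact ih (l + 1) (by omega) (by omega)

theorem pvBisect_eq (c : List Int) (hc : ∀ x ∈ c, 0 ≤ x) (K : Int) (hK : 0 ≤ K)
    (P : List Int) (hP : ∀ i ≤ c.length, P.getD i 0 = pvPf c i) (r1 : Nat) (hr1 : r1 ≤ c.length) :
    ∀ fuel lo hi, hi - lo ≤ fuel → lo ≤ pvL c K hK r1 → pvL c K hK r1 ≤ hi → hi ≤ r1 →
      pvBisect P (pvPf c r1 - K) fuel lo hi = pvL c K hK r1 := by
  intro fuel
  induction fuel with
  | zero =>
    intro lo hi hd h1 h2 _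
    have : lo = pvL c K hK r1 := by omega
    rw [← this]; rfl
  | succ fuel ih =>
    intro lo hi hd h1 h2 h3
    rw [pvBisect_succ]
    rcases Nat.lt_or_ge lo hi with hlh | hlh
    · rw [if_pos hlh]
      have hmid1 : lo ≤ (lo + hi) / 2 := by omega
      have hmid2 : (lo + hi) / 2 < hi := by omega
      have hPmid : P.getD ((lo + hi) / 2) 0 = pvPf c ((lo + hi) / 2) := hP _ (by omega)
      by_cases hcmp : P.getD ((lo + hi) / 2) 0 < pvPf c r1 - K
      · rw [if_pos hcmp]
        have hLgt : (lo + hi) / 2 < pvL c K hK r1 := by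
          by_contra hcon
          have hmono : pvPf c (pvL c K hK r1) ≤ pvPf c ((lo + hi) / 2) :=
            pvPf_mono c hc (by omega)
          have := pvL_spec c K hK r1
          rw [hPmid] at hcmp
          omega
        exact ih _ _ (by omega) (by omega) h2 h3
      · rw [if_neg hcmp]
        have hLle : pvL c K hK r1 ≤ (lo + hi) / 2 := by
          apply pvL_min
          rw [hPmid] at hcmp
          omega
        exact ih _ _ (by omega) h1 hLle (by omega)
    · rw [if_neg (by omega)]
      omega

theorem pvLastD_range_map (g : Nat → Int) (k : Nat) :
    (((List.range (k + 1)).map g).getLastD 0) = g k := by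
  rw [List.range_succ, List.map_append]
  simp

theorem pvBuildP_aux (c : List Int) :
    ∀ d k, k + d = c.length →
      (c.drop k).foldl (fun acc x => acc ++ [acc.getLastD 0 + x])
          ((List.range (k + 1)).map (pvPf c)) =
        (List.range (c.length + 1)).map (pvPf c) := by
  intro d
  induction d with
  | zero =>
    intro k hk
    rw [List.drop_of_length_le (by omega)]
    rw [show c.length = k by omega]
    rfl
  | succ d ih =>
    intro k hk
    have hkl : k < c.length := by omega
    rw [List.drop_eq_getElem_cons hkl, List.foldl_cons, pvLastD_range_map,
        ← List.getD_eq_getElem c 0 hkl, ← pvPf_succ]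
    have h2 : List.map (pvPf c) (List.range (k + 1)) ++ [pvPf c (k + 1)] =
        List.map (pvPf c) (List.range (k + 2)) := by
      have hr : List.range (k + 2) = List.range (k + 1) ++ [k + 1] := List.range_succ
      rw [hr, List.map_append]; rfl
    rw [h2]
    exact ih (k + 1) (by omega)

theorem pvBuildP (c : List Int) :
    c.foldl (fun acc x => acc ++ [acc.getLastD 0 + x]) [0] =
      (List.range (c.length + 1)).map (pvPf c) := by
  have := pvBuildP_aux c c.length 0 (by omega)
  simpa [pvPf] using this

theorem pvMainA (c : List Int) (hc : ∀ x ∈ c, 0 ≤ x) (K : Int) (hK : 0 ≤ K)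
    (cost : Nat → Int) (hcost : ∀ i < c.length, cost i = c.getD i 0) :
    ∀ k, k ≤ c.length →
      (List.range k).foldl (pvStepA cost K (c.length + 1)) (0, 0, 0) =
        (pvPf c k - pvPf c (pvL c K hK k), pvL c K hK k, pvRes c K hK k) := by
  intro k
  induction k with
  | zero =>
    intro _
    have h0 : pvL c K hK 0 = 0 := by have := pvL_le c K hK 0; omega
    simp [h0, pvPf, pvRes]
  | succ k ih =>
    intro hk
    rw [List.range_succ, List.foldl_append, ih (by omega), List.foldl_cons, List.foldl_nil]
    unfold pvStepA
    have hw : pvPf c k - pvPf c (pvL c K hK k) + cost k = pvPf c (k + 1) - pvPf c (pvL c K hK k) := by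
      rw [hcost k (by omega), pvPf_succ]; ring
    simp only [hw]
    rw [pvShrink_eq c K hK cost hcost (k + 1) (by omega) (c.length + 1) (pvL c K hK k)
      (pvL_mono c hc K hK k) (by have := pvL_le c K hK (k + 1); omega)]
    refine Prod.ext rfl (Prod.ext rfl ?_)
    simp only [pvRes, List.range_succ, List.foldl_append, List.foldl_cons, List.foldl_nil]
    omega

theorem pvMainB (c : List Int) (hc : ∀ x ∈ c, 0 ≤ x) (K : Int) (hK : 0 ≤ K)
    (P : List Int) (hP : ∀ i ≤ c.length, P.getD i 0 = pvPf c i) :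
    (List.range c.length).foldl (pvStepB P K) 0 = pvRes c K hK c.length := by
  unfold pvRes
  apply PySem.List.foldl_congr_mem
  intro res r hr
  have hrn : r < c.length := List.mem_range.mp hr
  have hb := pvBisect_eq c hc K hK P hP (r + 1) (by omega) (r + 2) 0 (r + 1) (by omega) (by omega)
    (pvL_le c K hK (r + 1)) (by omega)
  simp only [pvStepB, hP (r + 1) (by omega), hb]

-- trivial case: empty s (both folds are over an empty range)
theorem pvEmpty (s t : String) (K : Int) (h : s.toList = []) :
    equalSubstring s t K = equalSubstring_alt s t K := by
  unfold equalSubstring equalSubstring_alt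
  simp [h]

-- ===== VERDICT (by name: the statement is the Claim_ definition above) =====
theorem equalSubstring_spec : Claim_equal_equalSubstring := by
  intro s t mc _ hpre
  unfold Spec_equalSubstring
  rcases hpre with ⟨hlen, hemp | hK⟩
  · exact pvEmpty s t mc hemp
  · -- nonempty (or any) s with 0 ≤ mc
    set ls := s.toList with hls
    set lt := t.toList with hlt
    set c : List Int := (ls.zip lt).map (fun p => |((p.1.toNat : Int)) - (p.2.toNat : Int)|) with hc
    have hclen : c.length = ls.length := by
      simp [hc, List.length_zip]; omega
    have hcnn : ∀ x ∈ c, 0 ≤ x := by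
      intro x hx
      rw [hc] at hx
      obtain ⟨p, _, rfl⟩ := List.mem_map.mp hx
      exact abs_nonneg _
    have hcost : ∀ i < c.length,
        |((ls.map (fun ch => (ch.toNat : Int))).getD i 0 -
          (lt.map (fun ch => (ch.toNat : Int))).getD i 0)| = c.getD i 0 := by
      intro i hi
      have hi1 : i < ls.length := by omega
      have hi2 : i < lt.length := by omega
      have hiz : i < (ls.zip lt).length := by simp [List.length_zip]; omega
      have e1 : (ls.map (fun ch => (ch.toNat : Int))).getD i 0 = ((ls[i]'hi1).toNat : Int) := by
        rw [List.getD_eq_getElem _ 0 (by simpa using hi1)]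
        simp
      have e2 : (lt.map (fun ch => (ch.toNat : Int))).getD i 0 = ((lt[i]'hi2).toNat : Int) := by
        rw [List.getD_eq_getElem _ 0 (by simpa using hi2)]
        simp
      have e3 : c.getD i 0 = |(((ls[i]'hi1).toNat : Int)) - ((lt[i]'hi2).toNat : Int)| := by
        rw [hc, List.getD_eq_getElem _ 0 (by simpa [List.length_zip] using hiz)]
        simp
      rw [e1, e2, e3]
    have hfold : (ls.zip lt).foldl
        (fun acc p => acc ++ [acc.getLastD 0 + |((p.1.toNat : Int)) - (p.2.toNat : Int)|]) [0] =
        (List.range (c.length + 1)).map (pvPf c) := by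
      rw [← pvBuildP c]
      conv_rhs => rw [hc]
      rw [List.foldl_map]
    have hP : ∀ i ≤ c.length, ((List.range (c.length + 1)).map (pvPf c)).getD i 0 = pvPf c i := by
      intro i hi
      rw [List.getD_eq_getElem _ 0 (by simpa using Nat.lt_succ_of_le hi)]
      simp
    simp only [equalSubstring, equalSubstring_alt, List.length_map]
    rw [← hls, ← hlt, hfold, ← hclen]
    rw [pvMainA c hcnn mc hK _ hcost c.length le_rfl, pvMainB c hcnn mc hK _ hP]
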